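-- pv_equiv track=rewrite | github.com/ase12345636/NTNU-1141-Machine-Learning-Project | evaluate/CheXStruct/preprocessor/carina_angle.py | find_filtered_zero_groups
-- ===== SOURCE A (Python) =====
-- def find_filtered_zero_groups(row):
--     zero_indices = [i for i, val in enumerate(row) if val == 0]
--     groups = []
--     temp_group = []
--
--     for i in zero_indices:
--         if not temp_group or i == temp_group[-1] + 1:
--             temp_group.append(i)
--         else:
--             groups.append(temp_group)
--             temp_group = [i]
--
--     if temp_group:
--         groups.append(temp_group)
--
--     filtered_groups = [g for g in groups if 0 not in g and (len(row) - 1) not in g]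
--
--     return filtered_groups
-- ===== SOURCE B (Python) =====
-- def find_filtered_zero_groups(row):
--     # One pass: track the start of the current zero-run; emit list(range(start, i))
--     # when the run closes at a nonzero. A run starting at index 0 is skipped, and a
--     # run still open at the end touches the last index, so it is never emitted.
--     groups = []
--     start = None
--     for i, val in enumerate(row):
--         if val == 0:
--             if start is None:
--                 start = i
--         elif start is not None:
--             if start > 0:
--                 groups.append(list(range(start, i)))
--             start = None
--     return groups
-- ===== Notes on version B (the rewrite author's own statement) =====
-- stated objective: simpler
-- what changed: A makes three passes (collect all zero indices, regroup them by detecting gaps, then filter out groups containing index 0 or len-1 by membership); B is a single pass over the row that tracks the start of the current zero-run and emits a run only when it closes strictly inside the row, so the index list, the regrouping loop and the boundary filter all disappear.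
import Mathlib
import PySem

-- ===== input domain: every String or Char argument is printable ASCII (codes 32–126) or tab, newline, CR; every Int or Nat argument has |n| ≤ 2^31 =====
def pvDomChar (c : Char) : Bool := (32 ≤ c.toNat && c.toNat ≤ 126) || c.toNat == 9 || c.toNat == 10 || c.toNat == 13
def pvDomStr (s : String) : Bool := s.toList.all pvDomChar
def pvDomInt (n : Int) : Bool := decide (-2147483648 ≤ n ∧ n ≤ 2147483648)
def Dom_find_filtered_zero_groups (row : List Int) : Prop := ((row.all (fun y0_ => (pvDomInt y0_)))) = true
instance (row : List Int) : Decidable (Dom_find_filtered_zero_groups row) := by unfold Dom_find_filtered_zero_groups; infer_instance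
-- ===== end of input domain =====

-- B replaces A's three passes (collect zero indices, regroup by gaps, filter out boundary
-- groups by membership) with a single pass that tracks the start of the current zero-run
-- and emits a run only when it closes away from the boundaries (objective: simpler).

-- ===== PORT A =====
-- loop body of A's 'for i in zero_indices' loop
def stepA (st : List (List Int) × List Int) (i : Int) : List (List Int) × List Int :=
  if st.2 = [] ∨ some i = st.2.getLast?.map (· + 1) then (st.1, st.2 ++ [i])
  else (st.1 ++ [st.2], [i])

def find_filtered_zero_groups (row : List Int) : List (List Int) :=
  let zero_indices := ((PySem.List.enumerate row).filter (fun p => p.2 == 0)).map (fun p => p.1)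
  let st := zero_indices.foldl stepA ([], [])
  let groups := if st.2 ≠ [] then st.1 ++ [st.2] else st.1
  groups.filter (fun g => !(g.contains 0) && !(g.contains ((row.length : Int) - 1)))

-- ===== PORT B =====
-- list(range(a, b)) for Int bounds
def pyIntRange (a b : Int) : List Int := (List.range (b - a).toNat).map (fun k : Nat => a + (k : Int))

-- loop body of B's 'for i, val in enumerate(row)' loop; state = (groups, start)
def stepB (st : List (List Int) × Option Int) (p : Int × Int) : List (List Int) × Option Int :=
  if p.2 = 0 then
    match st.2 with
    | none => (st.1, some p.1)
    | some _ => st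
  else
    match st.2 with
    | some s => (if 0 < s then st.1 ++ [pyIntRange s p.1] else st.1, none)
    | none => st

def find_filtered_zero_groups_alt (row : List Int) : List (List Int) :=
  ((PySem.List.enumerate row).foldl stepB ([], none)).1

-- ===== PRECONDITION & SPEC =====
def Spec_find_filtered_zero_groups (row : List Int) (out : List (List Int)) : Prop := out = find_filtered_zero_groups_alt row
instance (row : List Int) (out : List (List Int)) : Decidable (Spec_find_filtered_zero_groups row out) := by unfold Spec_find_filtered_zero_groups; infer_instance

-- ===== CLAIM (what is proved, stated in full; the proofs are below) =====
def Claim_equal_find_filtered_zero_groups : Prop := ∀ (row : List Int), Dom_find_filtered_zero_groups row → Spec_find_filtered_zero_groups row (find_filtered_zero_groups row)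

-- ===== LEMMAS AND PROOFS =====

-- the boundary filter of A, parameterised by the row length
def pfilt (n : Int) (g : List Int) : Bool := !(g.contains 0) && !(g.contains (n - 1))

-- one step of A's loop over 'enumerate row': act only on zero entries
def stepAZ (st : List (List Int) × List Int) (p : Int × Int) : List (List Int) × List Int :=
  if p.2 = 0 then stepA st p.1 else st

theorem pfilt_port (n : Int) : (fun g : List Int => !(g.contains 0) && !(g.contains (n - 1))) = pfilt n := rfl

theorem mem_pyIntRange (s e x : Int) : x ∈ pyIntRange s e ↔ s ≤ x ∧ x < e := by
  unfold pyIntRange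
  rw [List.mem_map]
  constructor
  · rintro ⟨k, hk, rfl⟩
    rw [List.mem_range] at hk
    omega
  · rintro ⟨h1, h2⟩
    exact ⟨(x - s).toNat, List.mem_range.mpr (by omega), by omega⟩

theorem pyIntRange_ne_nil {s e : Int} (h : s < e) : pyIntRange s e ≠ [] := by
  intro hnil
  have : e - 1 ∈ pyIntRange s e := (mem_pyIntRange s e (e-1)).2 (by omega)
  simp [hnil] at this

theorem pyIntRange_snoc {s k : Int} (h : s ≤ k) : pyIntRange s (k + 1) = pyIntRange s k ++ [k] := by
  unfold pyIntRange
  rw [show (k + 1 - s).toNat = (k - s).toNat + 1 from by omega, List.range_succ,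
    List.map_append, List.map_singleton]
  congr 2
  omega

theorem pyIntRange_getLast? {s e : Int} (h : s < e) : (pyIntRange s e).getLast? = some (e - 1) := by
  have he : e = (e - 1) + 1 := by omega
  rw [he, pyIntRange_snoc (by omega)]
  simp

theorem pyIntRange_single (s : Int) : pyIntRange s (s + 1) = [s] := by
  rw [pyIntRange_snoc le_rfl]
  simp [pyIntRange]

theorem pfilt_rng {s e n : Int} (h0 : 0 ≤ s) (hse : s < e) (hen : e ≤ n) :
    pfilt n (pyIntRange s e) = (decide (0 < s) && decide (e < n)) := by
  simp only [pfilt, List.contains_eq_mem, mem_pyIntRange]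
  have c1 : decide (s ≤ 0 ∧ 0 < e) = !decide (0 < s) := by
    by_cases h : 0 < s <;> simp [h]; omega
  have c2 : decide (s ≤ n - 1 ∧ n - 1 < e) = !decide (e < n) := by
    by_cases h : e < n <;> simp [h]; omega
  rw [c1, c2, Bool.not_not, Bool.not_not]

theorem filter_concat (p : List Int → Bool) (l : List (List Int)) (a : List Int) :
    (l ++ [a]).filter p = l.filter p ++ if p a then [a] else [] := by
  rw [List.filter_append]
  cases h : p a <;> simp [List.filter, h]

theorem foldl_filter_map (l : List (Int × Int)) (s : List (List Int) × List Int) :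
    ((l.filter (fun p => p.2 == 0)).map (fun p => p.1)).foldl stepA s = l.foldl stepAZ s := by
  induction l generalizing s with
  | nil => rfl
  | cons x xs ih =>
      by_cases h : x.2 = 0 <;> simp [stepAZ, h, ih]

-- evaluation rules for the two loop bodies
theorem stepAZ_zero {st : List (List Int) × List Int} {p : Int × Int} (h : p.2 = 0) :
    stepAZ st p = stepA st p.1 := by unfold stepAZ; rw [if_pos h]

theorem stepAZ_nonzero {st : List (List Int) × List Int} {p : Int × Int} (h : ¬ p.2 = 0) :
    stepAZ st p = st := by unfold stepAZ; rw [if_neg h]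

theorem stepA_cont {g : List (List Int)} {t : List Int} {i : Int}
    (h : t = [] ∨ some i = t.getLast?.map (· + 1)) : stepA (g, t) i = (g, t ++ [i]) := by
  unfold stepA; rw [if_pos h]

theorem stepA_break {g : List (List Int)} {t : List Int} {i : Int}
    (h : ¬ (t = [] ∨ some i = t.getLast?.map (· + 1))) : stepA (g, t) i = (g ++ [t], [i]) := by
  unfold stepA; rw [if_neg h]

theorem stepB_zn {g : List (List Int)} {p : Int × Int} (h : p.2 = 0) :
    stepB (g, none) p = (g, some p.1) := by unfold stepB; rw [if_pos h]

theorem stepB_zs {g : List (List Int)} {s : Int} {p : Int × Int} (h : p.2 = 0) :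
    stepB (g, some s) p = (g, some s) := by unfold stepB; rw [if_pos h]

theorem stepB_nn {g : List (List Int)} {p : Int × Int} (h : ¬ p.2 = 0) :
    stepB (g, none) p = (g, none) := by unfold stepB; rw [if_neg h]

theorem stepB_ns {g : List (List Int)} {s : Int} {p : Int × Int} (h : ¬ p.2 = 0) :
    stepB (g, some s) p = (if 0 < s then g ++ [pyIntRange s p.1] else g, none) := by
  unfold stepB; rw [if_neg h]

-- the loop invariant: run A's remaining loop (finished with temp-append and boundary filter)
-- and B's remaining loop from related states; the results agree.
theorem main_lemma : ∀ (l : List Int) (k n : Int) (gA : List (List Int)) (tA : List Int)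
    (gB : List (List Int)) (sB : Option Int),
    0 ≤ k → n = k + l.length →
    ((tA = [] ∧ sB = none ∧ gB = gA.filter (pfilt n))
     ∨ (∃ s, 0 ≤ s ∧ s < k ∧ tA = pyIntRange s k ∧ sB = some s ∧ gB = gA.filter (pfilt n))
     ∨ (∃ s e, 0 ≤ s ∧ s < e ∧ e < k ∧ tA = pyIntRange s e ∧ sB = none ∧
          gB = (gA ++ [tA]).filter (pfilt n))) →
    ((fun st : List (List Int) × List Int =>
        (if st.2 ≠ [] then st.1 ++ [st.2] else st.1).filter (pfilt n))
      ((PySem.List.enumerate l k).foldl stepAZ (gA, tA)))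
    = ((PySem.List.enumerate l k).foldl stepB (gB, sB)).1 := by
  intro l
  induction l with
  | nil =>
      intro k n gA tA gB sB hk hn hrel
      simp only [PySem.List.enumerate_nil, List.foldl_nil]
      rcases hrel with ⟨h1, _, h3⟩ | ⟨s, hs0, hsk, ht, _, hgB⟩ | ⟨s, e, hs0, hse, hek, ht, _, hgB⟩
      · simp [h1, h3]
      · -- the open run reaches the last index of the row, so A filters it out too
        have hne : tA ≠ [] := ht ▸ pyIntRange_ne_nil hsk
        have hkn : k = n := by simp at hn; omega
        rw [if_pos hne, filter_concat, ht, hkn, pfilt_rng hs0 (hkn ▸ hsk) le_rfl]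
        simp [hgB]
      · have hne : tA ≠ [] := ht ▸ pyIntRange_ne_nil hse
        rw [if_pos hne, hgB]
  | cons x xs ih =>
      intro k n gA tA gB sB hk hn hrel
      rw [PySem.List.enumerate_cons, List.foldl_cons, List.foldl_cons]
      have hn' : n = (k + 1) + (xs.length : Int) := by simp at hn ⊢; omega
      by_cases hx : x = 0
      · rcases hrel with ⟨h1, h2, h3⟩ | ⟨s, hs0, hsk, ht, hsB, hgB⟩ | ⟨s, e, hs0, hse, hek, ht, hsB, hgB⟩
        · subst h1; subst h2
          rw [stepAZ_zero hx, stepA_cont (Or.inl rfl), stepB_zn hx, List.nil_append]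
          exact ih (k+1) n gA [k] gB (some k) (by omega) hn'
            (Or.inr (Or.inl ⟨k, hk, by omega, (pyIntRange_single k).symm, rfl, h3⟩))
        · subst hsB
          have hlast : tA.getLast? = some (k - 1) := ht ▸ pyIntRange_getLast? hsk
          rw [stepAZ_zero hx, stepA_cont (Or.inr (by simp [hlast])), stepB_zs hx]
          exact ih (k+1) n gA (tA ++ [k]) gB (some s) (by omega) hn'
            (Or.inr (Or.inl ⟨s, hs0, by omega, by rw [ht, ← pyIntRange_snoc (le_of_lt hsk)], rfl, hgB⟩))
        · subst hsB
          have hlast : tA.getLast? = some (e - 1) := ht ▸ pyIntRange_getLast? hse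
          have hne : tA ≠ [] := ht ▸ pyIntRange_ne_nil hse
          rw [stepAZ_zero hx, stepA_break (by simp [hne, hlast]; omega), stepB_zn hx]
          exact ih (k+1) n (gA ++ [tA]) [k] gB (some k) (by omega) hn'
            (Or.inr (Or.inl ⟨k, hk, by omega, (pyIntRange_single k).symm, rfl, hgB⟩))
      · rcases hrel with ⟨h1, h2, h3⟩ | ⟨s, hs0, hsk, ht, hsB, hgB⟩ | ⟨s, e, hs0, hse, hek, ht, hsB, hgB⟩
        · subst h1; subst h2
          rw [stepAZ_nonzero hx, stepB_nn hx]
          exact ih (k+1) n gA [] gB none (by omega) hn' (Or.inl ⟨rfl, rfl, h3⟩)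
        · subst hsB
          rw [stepAZ_nonzero hx, stepB_ns hx]
          have hgB' : (if 0 < s then gB ++ [pyIntRange s k] else gB)
              = ((gA ++ [tA]).filter (pfilt n)) := by
            rw [filter_concat, ht, pfilt_rng hs0 hsk (by omega)]
            have hkn : decide (k < n) = true := by simp; omega
            rw [hkn, Bool.and_true, hgB]
            by_cases h0s : 0 < s <;> simp [h0s]
          exact ih (k+1) n gA tA (if 0 < s then gB ++ [pyIntRange s k] else gB) none (by omega) hn'
            (Or.inr (Or.inr ⟨s, k, hs0, hsk, by omega, ht, rfl, hgB'⟩))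
        · subst hsB
          rw [stepAZ_nonzero hx, stepB_nn hx]
          exact ih (k+1) n gA tA gB none (by omega) hn'
            (Or.inr (Or.inr ⟨s, e, hs0, hse, by omega, ht, rfl, hgB⟩))

-- ===== VERDICT (by name: the statement is the Claim_ definition above) =====
theorem find_filtered_zero_groups_spec : Claim_equal_find_filtered_zero_groups := by
  intro row _
  unfold Spec_find_filtered_zero_groups find_filtered_zero_groups find_filtered_zero_groups_alt
  simp only [pfilt_port]
  rw [foldl_filter_map]
  exact main_lemma row 0 ((row.length : Int)) [] [] [] none le_rfl (by simp)
    (Or.inl ⟨rfl, rfl, rfl⟩)
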